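-- pv_equiv track=rewrite | github.com/tiilt-lab/chemistry-dashboard | audio_processing/speaker_tagging/utils.py | create_bins
-- ===== SOURCE A (Python) =====
-- from collections import OrderedDict
--
-- def create_bins(mean_val):
--     creat_list = True
--     person = 0
--     DIST_THRESH = 15
--     g = OrderedDict()
--     for i,m in zip(mean_val,range(len(mean_val))):
--         present = False
--         if m == 0:
--             person += 1
--             g['person_{0}'.format(person)] = []
--             g['index_{0}'.format(person)] = []
--             g['person_{0}'.format(person)].append(i)
--             g['index_{0}'.format(person)].append(m)
--             continue
--         for j in range(person):
--             if abs(i - g['person_{0}'.format(j+1)][0]) < DIST_THRESH: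
--                 g['person_{0}'.format(j+1)].append(i)
--                 g['index_{0}'.format(j+1)].append(m)
--                 present = True
--             if present == True:
--                 break
--         if present == False:
--             person += 1
--             g['person_{0}'.format(person)] = []
--             g['index_{0}'.format(person)] = []
--             g['person_{0}'.format(person)].append(i)
--             g['index_{0}'.format(person)].append(m)
--     person_list = [0]*len(mean_val)
--     for p in range(person):
--         for  kk in g['index_{0}'.format(p+1)]:
--             person_list[kk] = p+1
--     return mean_val, person_list
-- ===== SOURCE B (Python) =====
-- def create_bins(mean_val):
--     DIST_THRESH = 15
--     buckets = {}          # v // 15  ->  (representative value, person number)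
--     person = 0
--     person_list = []
--     for v in mean_val:
--         q = v // DIST_THRESH
--         best = None
--         for b in (q - 1, q, q + 1):
--             if b in buckets:
--                 rep, p = buckets[b]
--                 if abs(v - rep) < DIST_THRESH:
--                     if best is None or p < best:
--                         best = p
--         if best is None:
--             person += 1
--             buckets[q] = (v, person)
--             person_list.append(person)
--         else:
--             person_list.append(best)
--     return mean_val, person_list
-- ===== Notes on version B (the rewrite author's own statement) =====
-- stated objective: faster
-- what changed: Replaces the per-value linear scan over all existing bins (plus the string-keyed dict of bins and a second scatter pass) with a hash map keyed by value//15: since bin representatives are pairwise >=15 apart, each width-15 bucket holds at most one representative, so each value is matched by probing only buckets q-1,q,q+1 and labels are emitted directly in one pass.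
import Mathlib
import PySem

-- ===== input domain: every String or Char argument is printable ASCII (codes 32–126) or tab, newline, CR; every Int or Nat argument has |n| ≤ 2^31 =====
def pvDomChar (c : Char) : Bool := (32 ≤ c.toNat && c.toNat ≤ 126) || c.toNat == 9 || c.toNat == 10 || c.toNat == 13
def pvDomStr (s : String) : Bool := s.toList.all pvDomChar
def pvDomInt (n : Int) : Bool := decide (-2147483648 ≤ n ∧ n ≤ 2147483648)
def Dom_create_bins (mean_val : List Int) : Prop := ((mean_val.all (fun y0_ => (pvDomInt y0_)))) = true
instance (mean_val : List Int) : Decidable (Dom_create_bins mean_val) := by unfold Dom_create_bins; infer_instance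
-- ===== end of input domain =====

-- B replaces A's per-value linear scan over all bins (and its string-keyed dict plus a second
-- scatter pass) by a hash map keyed by value // 15 probed at q-1, q, q+1, emitting labels in one pass.

-- ===== PORT A =====
-- 'person_{0}'.format(k) and 'index_{0}'.format(k)
def aKeyP (k : Int) : String := "person_" ++ PySem.Int.toStr k
def aKeyI (k : Int) : String := "index_" ++ PySem.Int.toStr k

-- the shared "new person" block (both the m == 0 branch and the present == False branch)
def aNew (person : Int) (g : PySem.Dict String (List Int)) (i m : Int) :
    Int × PySem.Dict String (List Int) :=
  let person := person + 1
  let g := g.insert (aKeyP person) []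
  let g := g.insert (aKeyI person) []
  let g := g.modify (aKeyP person) [] (fun l => l ++ [i])
  let g := g.modify (aKeyI person) [] (fun l => l ++ [m])
  (person, g)

-- 'for j in range(person): … if present == True: break' (break = stop recursing)
def aInner (i m : Int) : List Int → PySem.Dict String (List Int) →
    PySem.Dict String (List Int) × Bool
  | [], g => (g, false)
  | j :: js, g =>
    if |i - PySem.List.pyGetD (g.getD (aKeyP (j + 1)) []) 0 0| < 15 then
      let g := g.modify (aKeyP (j + 1)) [] (fun l => l ++ [i])
      let g := g.modify (aKeyI (j + 1)) [] (fun l => l ++ [m])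
      (g, true)
    else
      aInner i m js g

def aStep (st : Int × PySem.Dict String (List Int)) (p : Int × Int) :
    Int × PySem.Dict String (List Int) :=
  if p.2 == 0 then aNew st.1 st.2 p.1 p.2
  else
    let r := aInner p.1 p.2 (PySem.List.pyRange 0 st.1) st.2
    if r.2 then (st.1, r.1) else aNew st.1 r.1 p.1 p.2

def create_bins (mean_val : List Int) : List Int × List Int :=
  let st := (mean_val.zip (PySem.List.pyRange 0 (PySem.List.len mean_val))).foldl aStep
      (0, PySem.Dict.empty)
  let pl0 : List Int := List.replicate mean_val.length 0
  let pl := (PySem.List.pyRange 0 st.1).foldl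
      (fun pl p => (st.2.getD (aKeyI (p + 1)) []).foldl
        (fun pl kk => PySem.List.pySetD pl kk (p + 1)) pl) pl0
  (mean_val, pl)

-- ===== PORT B =====
-- body of 'for b in (q-1, q, q+1): if b in buckets: …'
def bScan (buckets : PySem.Dict Int (Int × Int)) (v : Int) (best : Option Int) (b : Int) :
    Option Int :=
  match buckets.get? b with
  | none => best
  | some rp =>
    if |v - rp.1| < 15 then
      match best with
      | none => some rp.2
      | some bv => if rp.2 < bv then some rp.2 else best
    else best

def bStep (st : PySem.Dict Int (Int × Int) × Int × List Int) (v : Int) :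
    PySem.Dict Int (Int × Int) × Int × List Int :=
  let q := PySem.Int.floordiv v 15
  let best := [q - 1, q, q + 1].foldl (bScan st.1 v) none
  match best with
  | none => (st.1.insert q (v, st.2.1 + 1), st.2.1 + 1, st.2.2 ++ [st.2.1 + 1])
  | some p => (st.1, st.2.1, st.2.2 ++ [p])

def create_bins_alt (mean_val : List Int) : List Int × List Int :=
  let fin := mean_val.foldl bStep (PySem.Dict.empty, 0, [])
  (mean_val, fin.2.2)

-- ===== PRECONDITION & SPEC =====
def Spec_create_bins (mean_val : List Int) (out : List Int × List Int) : Prop := out = create_bins_alt mean_val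
instance (mean_val : List Int) (out : List Int × List Int) : Decidable (Spec_create_bins mean_val out) := by unfold Spec_create_bins; infer_instance

-- ===== CLAIM (what is proved, stated in full; the proofs are below) =====
def Claim_equal_create_bins : Prop := ∀ (mean_val : List Int), Dom_create_bins mean_val → Spec_create_bins mean_val (create_bins mean_val)

-- ===== LEMMAS AND PROOFS =====

-- reference model: a bin is (representative value, list of indices); first match wins
def pvFM (v : Int) : List Int → Option Nat
  | [] => none
  | r :: rs => if |v - r| < 15 then some 0 else (pvFM v rs).map (· + 1)

def pvLab (S : List (Int × List Int)) (v : Int) : Int :=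
  match pvFM v (S.map Prod.fst) with
  | some k => (k : Int) + 1
  | none => (S.length : Int) + 1

def pvStepS (S : List (Int × List Int)) (v m : Int) : List (Int × List Int) :=
  match pvFM v (S.map Prod.fst) with
  | some k => S.modify k (fun b => (b.1, b.2 ++ [m]))
  | none => S ++ [(v, [m])]

def pvRunIdx : List Int → Nat → List (Int × List Int) → List (Int × List Int)
  | [], _, S => S
  | v :: vs, t, S => pvRunIdx vs (t + 1) (pvStepS S v (t : Int))

def pvLabelsIdx : List Int → Nat → List (Int × List Int) → List Int
  | [], _, _ => []
  | v :: vs, t, S => pvLab S v :: pvLabelsIdx vs (t + 1) (pvStepS S v (t : Int))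

-- characterization of the reference state used by A's final scatter pass
def pvChar (t : Nat) (S : List (Int × List Int)) (pl : List Int) : Prop :=
  pl.length = t ∧
  (∀ j, j < t → 1 ≤ pl.getD j 0 ∧ pl.getD j 0 ≤ (S.length : Int)) ∧
  (∀ k, (hk : k < S.length) →
    S[k].2 = ((List.range t).filter (fun j => pl.getD j 0 = (k : Int) + 1)).map Int.ofNat)

def InvA (S : List (Int × List Int)) (g : PySem.Dict String (List Int)) : Prop :=
  ∀ k, (hk : k < S.length) →
    (∃ tl, g.getD (aKeyP ((k : Int) + 1)) [] = S[k].1 :: tl) ∧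
    g.getD (aKeyI ((k : Int) + 1)) [] = S[k].2

def InvB (S : List (Int × List Int)) (d : PySem.Dict Int (Int × Int)) : Prop :=
  (∀ k, (hk : k < S.length) →
     d.get? (PySem.Int.floordiv S[k].1 15) = some (S[k].1, (k : Int) + 1)) ∧
  (∀ q r p, d.get? q = some (r, p) →
     ∃ k, ∃ hk : k < S.length, S[k].1 = r ∧ p = (k : Int) + 1 ∧ q = PySem.Int.floordiv r 15)

-- ---------- string-key disjointness ----------
def pvDigitsVal (cs : List Char) : Nat := cs.foldl (fun a c => a * 10 + (c.toNat - 48)) 0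

lemma pv_core_eq (n : Nat) : ∀ (f : Nat) (ds : List Char), n < f →
    Nat.toDigitsCore 10 f n ds = Nat.toDigits 10 n ++ ds := by
  induction n using Nat.strong_induction_on with
  | _ n ih =>
    intro f ds hf
    match f with
    | f + 1 =>
      by_cases h10 : n / 10 = 0
      · simp [Nat.toDigitsCore, Nat.toDigits, h10]
      · have hlt : n / 10 < n := Nat.div_lt_self (by omega) (by omega)
        rw [show Nat.toDigitsCore 10 (f+1) n ds
              = Nat.toDigitsCore 10 f (n/10) (Nat.digitChar (n % 10) :: ds) by
            simp [Nat.toDigitsCore, h10]]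
        rw [show Nat.toDigits 10 n
              = Nat.toDigitsCore 10 n (n/10) [Nat.digitChar (n % 10)] by
            simp [Nat.toDigits, Nat.toDigitsCore, h10]]
        rw [ih (n/10) hlt f _ (by omega), ih (n/10) hlt n _ (by omega)]
        simp

lemma pvDigitsVal_append (xs : List Char) (c : Char) (a : Nat) :
    (xs ++ [c]).foldl (fun a c => a * 10 + (c.toNat - 48)) a
      = (xs.foldl (fun a c => a * 10 + (c.toNat - 48)) a) * 10 + (c.toNat - 48) := by
  simp

lemma pv_digitChar_val (d : Nat) (hd : d < 10) : (Nat.digitChar d).toNat - 48 = d := by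
  interval_cases d <;> decide

lemma pvDigitsVal_toDigits (n : Nat) : pvDigitsVal (Nat.toDigits 10 n) = n := by
  induction n using Nat.strong_induction_on with
  | _ n ih =>
    by_cases h10 : n / 10 = 0
    · have hn : n < 10 := by omega
      unfold pvDigitsVal
      rw [show Nat.toDigits 10 n = [Nat.digitChar (n % 10)] by
        simp [Nat.toDigits, Nat.toDigitsCore, h10]]
      simp [pv_digitChar_val (n % 10) (by omega)]
      omega
    · have hlt : n / 10 < n := Nat.div_lt_self (by omega) (by omega)
      rw [show Nat.toDigits 10 n
            = Nat.toDigitsCore 10 n (n/10) [Nat.digitChar (n % 10)] by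
          simp [Nat.toDigits, Nat.toDigitsCore, h10]]
      rw [pv_core_eq (n/10) n _ hlt]
      unfold pvDigitsVal at *
      rw [pvDigitsVal_append, ih (n/10) hlt, pv_digitChar_val (n % 10) (by omega)]
      omega

lemma pv_toDigits_inj {a b : Nat} (h : Nat.toDigits 10 a = Nat.toDigits 10 b) : a = b := by
  have := pvDigitsVal_toDigits a
  rw [h, pvDigitsVal_toDigits] at this
  omega

lemma pv_toChars_pos (a : Int) (ha : 0 < a) :
    PySem.Int.toChars a = Nat.toDigits 10 a.toNat := by
  unfold PySem.Int.toChars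
  rw [if_neg (by omega)]

lemma aKeyP_inj {a b : Int} (ha : 0 < a) (hb : 0 < b) (h : aKeyP a = aKeyP b) : a = b := by
  have h2 := congrArg String.toList h
  unfold aKeyP at h2
  rw [String.toList_append, String.toList_append, PySem.Int.toList_toStr,
    PySem.Int.toList_toStr] at h2
  have h3 := List.append_cancel_left h2
  rw [pv_toChars_pos a ha, pv_toChars_pos b hb] at h3
  have := pv_toDigits_inj h3
  omega

lemma aKeyI_inj {a b : Int} (ha : 0 < a) (hb : 0 < b) (h : aKeyI a = aKeyI b) : a = b := by
  have h2 := congrArg String.toList h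
  unfold aKeyI at h2
  rw [String.toList_append, String.toList_append, PySem.Int.toList_toStr,
    PySem.Int.toList_toStr] at h2
  have h3 := List.append_cancel_left h2
  rw [pv_toChars_pos a ha, pv_toChars_pos b hb] at h3
  have := pv_toDigits_inj h3
  omega

lemma aKeyP_ne_aKeyI (a b : Int) : aKeyP a ≠ aKeyI b := by
  intro h
  have h2 := congrArg String.toList h
  unfold aKeyP aKeyI at h2
  rw [String.toList_append, String.toList_append] at h2
  have hp : ("person_" : String).toList = ['p','e','r','s','o','n','_'] := by decide
  have hi : ("index_" : String).toList = ['i','n','d','e','x','_'] := by decide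
  rw [hp, hi] at h2
  simp at h2

-- pvFM facts
lemma pvFM_none_iff (v : Int) (rs : List Int) :
    pvFM v rs = none ↔ ∀ r ∈ rs, ¬(|v - r| < 15) := by
  induction rs with
  | nil => simp [pvFM]
  | cons r rs ih =>
    by_cases h : |v - r| < 15
    · simp [pvFM, h, ih]
    · simp [pvFM, h, ih]
      exact fun _ => not_lt.mp h

lemma pvFM_some_spec (v : Int) (rs : List Int) (k : Nat) (h : pvFM v rs = some k) :
    k < rs.length ∧ |v - rs.getD k 0| < 15 ∧ ∀ j, j < k → ¬(|v - rs.getD j 0| < 15) := by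
  induction rs generalizing k with
  | nil => simp [pvFM] at h
  | cons r rs ih =>
    by_cases hm : |v - r| < 15
    · simp [pvFM, hm] at h
      subst h
      refine ⟨by simp, by simpa, by omega⟩
    · simp [pvFM, hm] at h
      obtain ⟨k', hk', rfl⟩ := h
      obtain ⟨h1, h2, h3⟩ := ih k' hk'
      refine ⟨by simpa using h1, by simpa using h2, ?_⟩
      intro j hj
      match j with
      | 0 => simpa using hm
      | j + 1 => simpa using h3 j (by omega)

-- floordiv bucket facts
lemma pv_bucket_range {v r : Int} (h : |v - r| < 15) :
    PySem.Int.floordiv v 15 - 1 ≤ PySem.Int.floordiv r 15 ∧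
    PySem.Int.floordiv r 15 ≤ PySem.Int.floordiv v 15 + 1 := by
  have hv : PySem.Int.floordiv v 15 * 15 ≤ v ∧ v < (PySem.Int.floordiv v 15 + 1) * 15 :=
    (PySem.Int.floordiv_eq_iff_of_pos (by norm_num)).mp rfl
  constructor
  · rw [PySem.Int.le_floordiv_iff_mul_le (by norm_num)]
    nlinarith [abs_lt.mp h]
  · have : PySem.Int.floordiv r 15 < PySem.Int.floordiv v 15 + 2 := by
      rw [PySem.Int.floordiv_lt_iff_lt_mul (by norm_num)]
      nlinarith [abs_lt.mp h]
    omega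

lemma pv_match_of_same_bucket {v r : Int}
    (h : PySem.Int.floordiv r 15 = PySem.Int.floordiv v 15) : |v - r| < 15 := by
  have hv : PySem.Int.floordiv v 15 * 15 ≤ v ∧ v < (PySem.Int.floordiv v 15 + 1) * 15 :=
    (PySem.Int.floordiv_eq_iff_of_pos (by norm_num)).mp rfl
  have hr : PySem.Int.floordiv r 15 * 15 ≤ r ∧ r < (PySem.Int.floordiv r 15 + 1) * 15 :=
    (PySem.Int.floordiv_eq_iff_of_pos (by norm_num)).mp rfl
  rw [h] at hr
  rw [abs_lt]
  omega

-- scan fold facts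
lemma foldl_bScan_none (d : PySem.Dict Int (Int × Int)) (v : Int) (l : List Int)
    (h : ∀ b ∈ l, ∀ rp, d.get? b = some rp → ¬(|v - rp.1| < 15)) :
    l.foldl (bScan d v) none = none := by
  induction l with
  | nil => rfl
  | cons b l ih =>
    have hb : bScan d v none b = none := by
      unfold bScan
      cases hg : d.get? b with
      | none => rfl
      | some rp => simp [h b (by simp) rp hg]
    rw [List.foldl_cons, hb]
    exact ih (fun b' hb' => h b' (by simp [hb']))

lemma foldl_bScan_keep (d : PySem.Dict Int (Int × Int)) (v : Int) (p0 : Int) (l : List Int)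
    (h : ∀ b ∈ l, ∀ rp, d.get? b = some rp → |v - rp.1| < 15 → p0 ≤ rp.2) :
    l.foldl (bScan d v) (some p0) = some p0 := by
  induction l with
  | nil => rfl
  | cons b l ih =>
    have hb : bScan d v (some p0) b = some p0 := by
      unfold bScan
      cases hg : d.get? b with
      | none => rfl
      | some rp =>
        by_cases hm : |v - rp.1| < 15
        · have := h b (by simp) rp hg hm
          simp [hm, show ¬ rp.2 < p0 by omega]
        · simp [hm]
    rw [List.foldl_cons, hb]
    exact ih (fun b' hb' => h b' (by simp [hb']))

lemma foldl_bScan_hits (d : PySem.Dict Int (Int × Int)) (v : Int) (p0 : Int) (l : List Int)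
    (hub : ∀ b ∈ l, ∀ rp, d.get? b = some rp → |v - rp.1| < 15 → p0 ≤ rp.2)
    (hex : ∃ b ∈ l, ∃ rp, d.get? b = some rp ∧ |v - rp.1| < 15 ∧ rp.2 = p0) :
    l.foldl (bScan d v) none = some p0 := by
  have main : ∀ (l : List Int), (∀ b ∈ l, ∀ rp, d.get? b = some rp → |v - rp.1| < 15 → p0 ≤ rp.2) →
      (∃ b ∈ l, ∃ rp, d.get? b = some rp ∧ |v - rp.1| < 15 ∧ rp.2 = p0) →
      ∀ b0 : Option Int, (∀ p, b0 = some p → p0 ≤ p) →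
      l.foldl (bScan d v) b0 = some p0 := by
    intro l
    induction l with
    | nil => intro _ hex; simp at hex
    | cons b l ih =>
      intro hub hex b0 hb0
      by_cases hw : ∃ rp, d.get? b = some rp ∧ |v - rp.1| < 15 ∧ rp.2 = p0
      · obtain ⟨rp, hg, hm, hp⟩ := hw
        have hstep : bScan d v b0 b = some p0 := by
          unfold bScan
          rw [hg]
          cases b0 with
          | none => simp [hm, hp]
          | some bv =>
            have h1 := hb0 bv rfl
            by_cases hlt : rp.2 < bv
            · simp [hm, hlt]
              omega
            · simp [hm, hlt]
              omega
        rw [List.foldl_cons, hstep]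
        exact foldl_bScan_keep d v p0 l (fun b' hb' => hub b' (by simp [hb']))
      · have hex' : ∃ b ∈ l, ∃ rp, d.get? b = some rp ∧ |v - rp.1| < 15 ∧ rp.2 = p0 := by
          obtain ⟨b', hb', rest⟩ := hex
          rcases List.mem_cons.mp hb' with rfl | hmem
          · exact absurd rest hw
          · exact ⟨b', hmem, rest⟩
        rw [List.foldl_cons]
        refine ih (fun b' hb' => hub b' (by simp [hb'])) hex' _ ?_
        intro p hp
        unfold bScan at hp
        cases hg : d.get? b with
        | none => rw [hg] at hp; exact hb0 p hp
        | some rp =>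
          rw [hg] at hp
          by_cases hm : |v - rp.1| < 15
          · have hub' := hub b (by simp) rp hg hm
            cases b0 with
            | none => simp [hm] at hp; omega
            | some bv =>
              have := hb0 bv rfl
              by_cases hlt : rp.2 < bv <;> simp [hm, hlt] at hp <;> omega
          · simp [hm] at hp; exact hb0 p hp
  exact main l hub hex none (by simp)

lemma scan_eq (S : List (Int × List Int)) (d : PySem.Dict Int (Int × Int)) (v : Int)
    (hInv : InvB S d) :
    [PySem.Int.floordiv v 15 - 1, PySem.Int.floordiv v 15, PySem.Int.floordiv v 15 + 1].foldl
      (bScan d v) none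
      = (pvFM v (S.map Prod.fst)).map (fun k => (k : Int) + 1) := by
  obtain ⟨hfwd, hbwd⟩ := hInv
  cases hfm : pvFM v (S.map Prod.fst) with
  | none =>
    have hnone : ∀ b ∈ [PySem.Int.floordiv v 15 - 1, PySem.Int.floordiv v 15,
        PySem.Int.floordiv v 15 + 1], ∀ rp, d.get? b = some rp → ¬(|v - rp.1| < 15) := by
      intro b _ rp hg hm
      obtain ⟨k, hk, hr, hp, hq⟩ := hbwd b rp.1 rp.2 (by simpa using hg)
      refine (pvFM_none_iff v _).mp hfm rp.1 ?_ hm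
      rw [← hr]
      exact List.mem_map_of_mem (List.getElem_mem hk)
    rw [foldl_bScan_none d v _ hnone]
    simp
  | some k0 =>
    obtain ⟨h1, h2, h3⟩ := pvFM_some_spec v _ k0 hfm
    rw [List.length_map] at h1
    have hk0 : (S.map Prod.fst).getD k0 0 = S[k0].1 := by
      rw [List.getD_eq_getElem _ _ (by simpa using h1)]
      simp
    rw [hk0] at h2
    rw [foldl_bScan_hits d v ((k0 : Int) + 1)]
    · rfl
    · intro b _ rp hg hm
      obtain ⟨k, hk, hr, hp, hq⟩ := hbwd b rp.1 rp.2 (by simpa using hg)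
      have hnotlt : ¬ k < k0 := by
        intro hlt
        refine h3 k hlt ?_
        rw [List.getD_eq_getElem _ _ (by simpa using hk), List.getElem_map, hr]
        exact hm
      rw [hp]
      omega
    · refine ⟨PySem.Int.floordiv S[k0].1 15, ?_, (S[k0].1, (k0 : Int) + 1), hfwd k0 h1, h2, rfl⟩
      have := pv_bucket_range h2
      simp only [List.mem_cons, List.mem_singleton]
      omega

lemma InvB_congr (S S' : List (Int × List Int)) (d : PySem.Dict Int (Int × Int))
    (hlen : S'.length = S.length) (hfst : ∀ k, (hk : k < S.length) → S'[k].1 = S[k].1)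
    (hInv : InvB S d) : InvB S' d := by
  obtain ⟨hfwd, hbwd⟩ := hInv
  constructor
  · intro k hk
    rw [hfst k (by omega)]
    exact hfwd k (by omega)
  · intro q r p h
    obtain ⟨k, hk, hr, hp, hq⟩ := hbwd q r p h
    exact ⟨k, by omega, by rw [hfst k hk]; exact hr, hp, hq⟩

lemma InvB_pvStepS_match (S : List (Int × List Int)) (d : PySem.Dict Int (Int × Int))
    (v m : Int) (k0 : Nat) (hfm : pvFM v (S.map Prod.fst) = some k0)
    (hInv : InvB S d) : InvB (pvStepS S v m) d := by
  unfold pvStepS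
  rw [hfm]
  refine InvB_congr S _ d (by simp) ?_ hInv
  intro k hk
  rw [List.getElem_modify]
  by_cases h : k0 = k <;> simp [h]

lemma InvB_pvStepS_new (S : List (Int × List Int)) (d : PySem.Dict Int (Int × Int))
    (v m : Int) (hfm : pvFM v (S.map Prod.fst) = none) (hInv : InvB S d) :
    InvB (pvStepS S v m)
      (d.insert (PySem.Int.floordiv v 15) (v, (S.length : Int) + 1)) := by
  obtain ⟨hfwd, hbwd⟩ := hInv
  have hnm : ∀ k, (hk : k < S.length) → ¬(|v - S[k].1| < 15) := by
    intro k hk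
    refine (pvFM_none_iff v _).mp hfm S[k].1 ?_
    exact List.mem_map_of_mem (List.getElem_mem hk)
  unfold pvStepS
  rw [hfm]
  constructor
  · intro k hk
    simp only [List.length_append, List.length_singleton] at hk
    by_cases hklt : k < S.length
    · rw [List.getElem_append_left hklt]
      rw [PySem.Dict.get?_insert_of_ne]
      · exact hfwd k hklt
      · intro heq
        exact hnm k hklt (pv_match_of_same_bucket heq)
    · have hk' : k = S.length := by omega
      rw [List.getElem_concat_length hk']
      simp only
      rw [PySem.Dict.get?_insert_self]
      congr 2
      omega
  · intro q r p h
    by_cases hq : q = PySem.Int.floordiv v 15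
    · subst hq
      rw [PySem.Dict.get?_insert_self] at h
      injection h with h'
      obtain ⟨rfl, rfl⟩ := Prod.mk.inj h'
      refine ⟨S.length, by simp, ?_, rfl, rfl⟩
      rw [List.getElem_concat_length rfl]
    · rw [PySem.Dict.get?_insert_of_ne _ _ hq] at h
      obtain ⟨k, hk, hr, hp, hq'⟩ := hbwd q r p h
      refine ⟨k, by simp; omega, ?_, hp, hq'⟩
      rw [List.getElem_append_left hk]
      exact hr

lemma bStep_eq (S : List (Int × List Int)) (d : PySem.Dict Int (Int × Int))
    (pl : List Int) (v m : Int) (hInv : InvB S d) :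
    ∃ d', bStep (d, (S.length : Int), pl) v
        = (d', ((pvStepS S v m).length : Int), pl ++ [pvLab S v])
      ∧ InvB (pvStepS S v m) d' := by
  unfold bStep
  simp only
  rw [scan_eq S d v hInv]
  cases hfm : pvFM v (S.map Prod.fst) with
  | none =>
    refine ⟨_, ?_, InvB_pvStepS_new S d v m hfm hInv⟩
    unfold pvLab pvStepS
    rw [hfm]
    simp
  | some k0 =>
    refine ⟨d, ?_, InvB_pvStepS_match S d v m k0 hfm hInv⟩
    unfold pvLab pvStepS
    rw [hfm]
    simp

lemma B_run (vs : List Int) : ∀ (t : Nat) (S : List (Int × List Int))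
    (d : PySem.Dict Int (Int × Int)) (pl : List Int), InvB S d →
    (vs.foldl bStep (d, (S.length : Int), pl)).2.2 = pl ++ pvLabelsIdx vs t S := by
  induction vs with
  | nil => intro t S d pl _; simp [pvLabelsIdx]
  | cons v vs ih =>
    intro t S d pl hInv
    obtain ⟨d', hstep, hInv'⟩ := bStep_eq S d pl v (t : Int) hInv
    rw [List.foldl_cons, hstep, ih (t + 1) (pvStepS S v (t : Int)) d' _ hInv']
    simp [pvLabelsIdx]

lemma B_eq (mv : List Int) : create_bins_alt mv = (mv, pvLabelsIdx mv 0 []) := by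
  unfold create_bins_alt
  have hInv : InvB [] PySem.Dict.empty := by
    constructor
    · intro k hk; simp at hk
    · intro q r p h
      simp [PySem.Dict.get?, PySem.Dict.empty] at h
  have h := B_run mv 0 [] PySem.Dict.empty [] hInv
  simp only [List.length_nil, Nat.cast_zero, List.nil_append] at h
  exact congrArg (Prod.mk mv) h

-- ============ new A-side lemmas ============

lemma aKeyP_ne_of_ne {a b : Int} (ha : 0 < a) (hb : 0 < b) (h : a ≠ b) : aKeyP a ≠ aKeyP b :=
  fun he => h (aKeyP_inj ha hb he)
lemma aKeyI_ne_of_ne {a b : Int} (ha : 0 < a) (hb : 0 < b) (h : a ≠ b) : aKeyI a ≠ aKeyI b :=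
  fun he => h (aKeyI_inj ha hb he)

lemma aInner_no_match (i m : Int) (S : List (Int × List Int))
    (g : PySem.Dict String (List Int)) (hInv : InvA S g) :
    ∀ (j0 : Nat), (∀ j, (hj : j < S.length) → j0 ≤ j → ¬(|i - S[j].1| < 15)) →
    aInner i m (PySem.List.pyRange (j0 : Int) (S.length : Int)) g = (g, false) := by
  intro j0
  induction hd : S.length - j0 generalizing j0 with
  | zero =>
    intro _
    rw [PySem.List.pyRange_one_eq_nil (by omega)]
    rfl
  | succ d ih =>
    intro hno
    have hj0 : j0 < S.length := by omega
    rw [PySem.List.pyRange_one_cons (by exact_mod_cast hj0)]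
    show aInner i m _ g = (g, false)
    unfold aInner
    obtain ⟨⟨tl, htl⟩, _⟩ := hInv j0 hj0
    rw [htl, PySem.List.pyGetD_zero_cons]
    rw [if_neg (hno j0 hj0 le_rfl)]
    have : ((j0 : Int) + 1) = (((j0 + 1 : Nat) : Int)) := by push_cast; ring
    rw [this]
    exact ih (j0 + 1) (by omega) (fun j hj hge => hno j hj (by omega))

lemma aInner_match (i m : Int) (S : List (Int × List Int))
    (g : PySem.Dict String (List Int)) (hInv : InvA S g) (k0 : Nat) (hk0 : k0 < S.length)
    (hm : |i - S[k0].1| < 15)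
    (hmin : ∀ j, (hj : j < S.length) → j < k0 → ¬(|i - S[j].1| < 15)) :
    ∀ (j0 : Nat), j0 ≤ k0 →
    aInner i m (PySem.List.pyRange (j0 : Int) (S.length : Int)) g
      = ((g.modify (aKeyP ((k0 : Int) + 1)) [] (fun l => l ++ [i])).modify
          (aKeyI ((k0 : Int) + 1)) [] (fun l => l ++ [m]), true) := by
  intro j0
  induction hd : k0 - j0 generalizing j0 with
  | zero =>
    intro hle
    have : j0 = k0 := by omega
    subst this
    rw [PySem.List.pyRange_one_cons (by exact_mod_cast hk0)]
    show aInner i m _ g = _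
    unfold aInner
    obtain ⟨⟨tl, htl⟩, _⟩ := hInv j0 hk0
    rw [htl, PySem.List.pyGetD_zero_cons, if_pos hm]
  | succ d ih =>
    intro hle
    have hj0 : j0 < S.length := by omega
    rw [PySem.List.pyRange_one_cons (by exact_mod_cast hj0)]
    show aInner i m _ g = _
    unfold aInner
    obtain ⟨⟨tl, htl⟩, _⟩ := hInv j0 hj0
    rw [htl, PySem.List.pyGetD_zero_cons]
    rw [if_neg (hmin j0 hj0 (by omega))]
    have : ((j0 : Int) + 1) = (((j0 + 1 : Nat) : Int)) := by push_cast; ring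
    rw [this]
    exact ih (j0 + 1) (by omega) (by omega)

lemma InvA_match (S : List (Int × List Int)) (g : PySem.Dict String (List Int))
    (hInv : InvA S g) (i m : Int) (k0 : Nat) (hk0 : k0 < S.length) :
    InvA (S.modify k0 (fun b => (b.1, b.2 ++ [m])))
      ((g.modify (aKeyP ((k0 : Int) + 1)) [] (fun l => l ++ [i])).modify
        (aKeyI ((k0 : Int) + 1)) [] (fun l => l ++ [m])) := by
  intro k hk
  rw [List.length_modify] at hk
  obtain ⟨⟨tl, htl⟩, hidx⟩ := hInv k hk
  simp only [List.getElem_modify]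
  by_cases he : k0 = k
  · subst he
    constructor
    · refine ⟨tl ++ [i], ?_⟩
      rw [PySem.Dict.getD_modify_of_ne _ _ _ (aKeyP_ne_aKeyI _ _)]
      rw [PySem.Dict.getD_modify_self, htl]
      simp
    · rw [PySem.Dict.getD_modify_self]
      rw [PySem.Dict.getD_modify_of_ne _ _ _ (Ne.symm (aKeyP_ne_aKeyI _ _))]
      rw [hidx]
      simp
  · rw [if_neg he]
    have hne : ((k : Int) + 1) ≠ ((k0 : Int) + 1) := by
      intro hh
      have h2 : (k : Int) = (k0 : Int) := by omega
      exact he (by exact_mod_cast h2.symm)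
    constructor
    · refine ⟨tl, ?_⟩
      rw [PySem.Dict.getD_modify_of_ne _ _ _ (aKeyP_ne_aKeyI _ _)]
      rw [PySem.Dict.getD_modify_of_ne _ _ _ (aKeyP_ne_of_ne (by omega) (by omega) hne)]
      exact htl
    · rw [PySem.Dict.getD_modify_of_ne _ _ _ (aKeyI_ne_of_ne (by omega) (by omega) hne)]
      rw [PySem.Dict.getD_modify_of_ne _ _ _ (Ne.symm (aKeyP_ne_aKeyI _ _))]
      exact hidx

lemma InvA_new (S : List (Int × List Int)) (g : PySem.Dict String (List Int))
    (hInv : InvA S g) (i m : Int) :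
    InvA (S ++ [(i, [m])]) (aNew ((S.length : Int)) g i m).2 := by
  unfold aNew
  simp only
  intro k hk
  simp only [List.length_append, List.length_singleton] at hk
  have hpos : (0 : Int) < (S.length : Int) + 1 := by omega
  by_cases he : k = S.length
  · subst he
    constructor
    · refine ⟨[], ?_⟩
      rw [List.getElem_concat_length rfl]
      rw [PySem.Dict.getD_modify_of_ne _ _ _ (aKeyP_ne_aKeyI _ _)]
      rw [PySem.Dict.getD_modify_self]
      rw [PySem.Dict.getD_insert_of_ne _ _ _ (aKeyP_ne_aKeyI _ _)]
      rw [PySem.Dict.getD_insert_self]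
      simp
    · rw [List.getElem_concat_length rfl]
      rw [PySem.Dict.getD_modify_self]
      rw [PySem.Dict.getD_modify_of_ne _ _ _ (Ne.symm (aKeyP_ne_aKeyI _ _))]
      rw [PySem.Dict.getD_insert_self]
      simp
  · have hklt : k < S.length := by omega
    have hne : ((k : Int) + 1) ≠ ((S.length : Int) + 1) := by
      intro hh
      have h2 : (k : Int) = (S.length : Int) := by omega
      exact he (by exact_mod_cast h2)
    obtain ⟨⟨tl, htl⟩, hidx⟩ := hInv k hklt
    rw [List.getElem_append_left hklt]
    constructor
    · refine ⟨tl, ?_⟩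
      rw [PySem.Dict.getD_modify_of_ne _ _ _ (aKeyP_ne_aKeyI _ _)]
      rw [PySem.Dict.getD_modify_of_ne _ _ _ (aKeyP_ne_of_ne (by omega) hpos hne)]
      rw [PySem.Dict.getD_insert_of_ne _ _ _ (aKeyP_ne_aKeyI _ _)]
      rw [PySem.Dict.getD_insert_of_ne _ _ _ (aKeyP_ne_of_ne (by omega) hpos hne)]
      exact htl
    · rw [PySem.Dict.getD_modify_of_ne _ _ _ (aKeyI_ne_of_ne (by omega) hpos hne)]
      rw [PySem.Dict.getD_modify_of_ne _ _ _ (Ne.symm (aKeyP_ne_aKeyI _ _))]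
      rw [PySem.Dict.getD_insert_of_ne _ _ _ (aKeyI_ne_of_ne (by omega) hpos hne)]
      rw [PySem.Dict.getD_insert_of_ne _ _ _ (Ne.symm (aKeyP_ne_aKeyI _ _))]
      exact hidx

lemma map_fst_getD (S : List (Int × List Int)) (j : Nat) (hj : j < S.length) :
    (S.map Prod.fst).getD j 0 = S[j].1 := by
  rw [List.getD_eq_getElem _ _ (by simpa using hj), List.getElem_map]

lemma aStep_eq (S : List (Int × List Int)) (g : PySem.Dict String (List Int))
    (t : Nat) (v : Int) (hInv : InvA S g) (ht : t = 0 → S = []) :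
    ∃ g', aStep ((S.length : Int), g) (v, (t : Int))
        = (((pvStepS S v (t : Int)).length : Int), g')
      ∧ InvA (pvStepS S v (t : Int)) g' := by
  by_cases h0 : t = 0
  · subst h0
    have hS := ht rfl
    subst hS
    refine ⟨_, ?_, by simpa using InvA_new [] g hInv v ((0 : Nat) : Int)⟩
    unfold aStep aNew pvStepS pvFM
    simp
  · unfold aStep
    rw [if_neg (by simp [h0])]
    simp only
    cases hfm : pvFM v (S.map Prod.fst) with
    | none =>
      have hno : ∀ j, (hj : j < S.length) → (0 : Nat) ≤ j → ¬(|v - S[j].1| < 15) := by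
        intro j hj _
        rw [← map_fst_getD S j hj]
        refine (pvFM_none_iff v _).mp hfm _ ?_
        rw [map_fst_getD S j hj]
        exact List.mem_map_of_mem (List.getElem_mem hj)
      have hin := aInner_no_match v (t : Int) S g hInv 0 hno
      rw [Nat.cast_zero] at hin
      rw [hin]
      rw [if_neg (show ¬((g, false).2 = true) by simp)]
      refine ⟨(aNew ((S.length : Int)) g v (t : Int)).2, ?_, ?_⟩
      · have h1 : (aNew ((S.length : Int)) g v (t : Int)).1
            = (((S ++ [(v, [(t : Int)])]).length : Nat) : Int) := by
          unfold aNew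
          simp
        unfold pvStepS
        rw [hfm]
        exact Prod.ext h1 rfl
      · have := InvA_new S g hInv v (t : Int)
        unfold pvStepS
        rw [hfm]
        exact this
    | some k0 =>
      obtain ⟨h1, h2, h3⟩ := pvFM_some_spec v _ k0 hfm
      rw [List.length_map] at h1
      rw [map_fst_getD S k0 h1] at h2
      have hmin : ∀ j, (hj : j < S.length) → j < k0 → ¬(|v - S[j].1| < 15) := by
        intro j hj hlt
        rw [← map_fst_getD S j hj]
        exact h3 j hlt
      have hin := aInner_match v (t : Int) S g hInv k0 h1 h2 hmin 0 (by omega)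
      rw [Nat.cast_zero] at hin
      rw [hin]
      rw [if_pos rfl]
      refine ⟨(g.modify (aKeyP ((k0 : Int) + 1)) [] (fun l => l ++ [v])).modify
          (aKeyI ((k0 : Int) + 1)) [] (fun l => l ++ [(t : Int)]), ?_, ?_⟩
      · refine Prod.ext ?_ rfl
        unfold pvStepS
        rw [hfm, List.length_modify]
      · unfold pvStepS
        rw [hfm]
        exact InvA_match S g hInv v (t : Int) k0 h1

lemma A_run (vs : List Int) : ∀ (t : Nat) (S : List (Int × List Int))
    (g : PySem.Dict String (List Int)), InvA S g → (t = 0 → S = []) →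
    ∃ g', (vs.zip (PySem.List.pyRange (t : Int) ((t : Int) + (vs.length : Int)))).foldl aStep
        ((S.length : Int), g)
        = (((pvRunIdx vs t S).length : Int), g')
      ∧ InvA (pvRunIdx vs t S) g' := by
  induction vs with
  | nil =>
    intro t S g hInv _
    refine ⟨g, ?_, hInv⟩
    rw [PySem.List.pyRange_one_eq_nil (by norm_num)]
    simp [pvRunIdx]
  | cons v vs ih =>
    intro t S g hInv ht
    rw [PySem.List.pyRange_one_cons (by rw [List.length_cons]; push_cast; omega)]
    rw [List.zip_cons_cons, List.foldl_cons]
    obtain ⟨g1, hstep, hInv1⟩ := aStep_eq S g t v hInv ht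
    rw [hstep]
    have ha : ((t : Int) + 1) = (((t + 1 : Nat) : Int)) := by push_cast; ring
    have hb : (t : Int) + (((v :: vs).length : Nat) : Int)
        = (((t + 1 : Nat) : Int)) + ((vs.length : Nat) : Int) := by
      rw [List.length_cons]; push_cast; ring
    rw [ha, hb]
    simpa [pvRunIdx] using ih (t + 1) (pvStepS S v (t : Int)) g1 hInv1 (by omega)

lemma pvChar_step (t : Nat) (S : List (Int × List Int)) (pl : List Int) (v : Int)
    (h : pvChar t S pl) : pvChar (t + 1) (pvStepS S v (t : Int)) (pl ++ [pvLab S v]) := by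
  obtain ⟨hlen, hbnd, hbin⟩ := h
  have hplget : ∀ j, j < t → (pl ++ [pvLab S v]).getD j 0 = pl.getD j 0 := by
    intro j hj
    exact List.getD_append pl [pvLab S v] 0 j (by omega)
  have hplt : (pl ++ [pvLab S v]).getD t 0 = pvLab S v := by
    rw [List.getD_eq_getElem _ _ (by simp; omega)]
    have ht : t = pl.length := hlen.symm
    subst ht
    exact List.getElem_concat_length rfl _
  have hfc : ∀ k : Nat,
      (List.range t).filter (fun j => decide ((pl ++ [pvLab S v]).getD j 0 = (k : Int) + 1))
        = (List.range t).filter (fun j => decide (pl.getD j 0 = (k : Int) + 1)) := by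
    intro k
    refine List.filter_congr ?_
    intro x hx
    rw [hplget x (List.mem_range.mp hx)]
  refine ⟨by simp [hlen], ?_, ?_⟩
  · intro j hj
    by_cases hjt : j < t
    · rw [hplget j hjt]
      have hb := hbnd j hjt
      have hlenS : S.length ≤ (pvStepS S v (t : Int)).length := by
        unfold pvStepS
        cases hfm : pvFM v (S.map Prod.fst)
        · simp
        · simp [List.length_modify]
      have hcast : ((S.length : Nat) : Int) ≤ (((pvStepS S v (t : Int)).length : Nat) : Int) := by
        exact_mod_cast hlenS
      omega
    · have hjt' : j = t := by omega
      rw [hjt', hplt]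
      cases hfm : pvFM v (S.map Prod.fst) with
      | none =>
        have hlab : pvLab S v = (S.length : Int) + 1 := by unfold pvLab; rw [hfm]
        have hsl : (pvStepS S v (t : Int)).length = S.length + 1 := by
          unfold pvStepS; rw [hfm]; simp
        rw [hlab, hsl]
        push_cast
        omega
      | some k0 =>
        obtain ⟨h1, _, _⟩ := pvFM_some_spec v _ k0 hfm
        rw [List.length_map] at h1
        have hlab : pvLab S v = (k0 : Int) + 1 := by unfold pvLab; rw [hfm]
        have hsl : (pvStepS S v (t : Int)).length = S.length := by
          unfold pvStepS; rw [hfm, List.length_modify]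
        rw [hlab, hsl]
        push_cast
        omega
  · intro k hk
    cases hfm : pvFM v (S.map Prod.fst) with
    | some k0 =>
      have hsl : pvStepS S v (t : Int) = S.modify k0 (fun b => (b.1, b.2 ++ [(t : Int)])) := by
        unfold pvStepS; rw [hfm]
      simp only [hsl] at hk ⊢
      rw [List.length_modify] at hk
      obtain ⟨h1, _, _⟩ := pvFM_some_spec v _ k0 hfm
      rw [List.length_map] at h1
      have hlab : pvLab S v = (k0 : Int) + 1 := by unfold pvLab; rw [hfm]
      rw [List.range_succ, List.filter_append, List.map_append, hfc k]
      rw [List.getElem_modify]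
      by_cases he : k0 = k
      · subst he
        rw [if_pos rfl]
        simp only
        rw [hbin k0 hk]
        congr 1
        rw [List.filter_singleton, hplt, hlab]
        simp
      · rw [if_neg he]
        have hne : ¬((k0 : Int) + 1 = (k : Int) + 1) := fun hh => he (by omega)
        rw [List.filter_singleton, hplt, hlab]
        simp [hne, hbin k hk]
    | none =>
      have hsl : pvStepS S v (t : Int) = S ++ [(v, [(t : Int)])] := by
        unfold pvStepS; rw [hfm]
      simp only [hsl] at hk ⊢
      simp only [List.length_append, List.length_singleton] at hk
      have hlab : pvLab S v = (S.length : Int) + 1 := by unfold pvLab; rw [hfm]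
      rw [List.range_succ, List.filter_append, List.map_append, hfc k]
      by_cases he : k = S.length
      · subst he
        rw [List.getElem_concat_length rfl]
        have hold : (List.filter (fun j => decide (pl.getD j 0 = (S.length : Int) + 1)) (List.range t))
            = [] := by
          rw [List.filter_eq_nil_iff]
          intro j hj
          have := hbnd j (List.mem_range.mp hj)
          simp only [decide_eq_true_eq]
          omega
        rw [hold, List.filter_singleton, hplt, hlab]
        simp
      · have hklt : k < S.length := by omega
        rw [List.getElem_append_left hklt]
        have hne : ¬((S.length : Int) + 1 = (k : Int) + 1) := by
          intro hh
          have h2 : S.length = k := by omega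
          omega
        rw [List.filter_singleton, hplt, hlab]
        simp [hne, hbin k hklt]

lemma pvChar_run (vs : List Int) : ∀ (t : Nat) (S : List (Int × List Int)) (pl : List Int),
    pvChar t S pl →
    pvChar (t + vs.length) (pvRunIdx vs t S) (pl ++ pvLabelsIdx vs t S) := by
  induction vs with
  | nil =>
    intro t S pl h
    simpa [pvRunIdx, pvLabelsIdx] using h
  | cons v vs ih =>
    intro t S pl h
    have hstep := pvChar_step t S pl v h
    have := ih (t + 1) (pvStepS S v (t : Int)) (pl ++ [pvLab S v]) hstep
    have harr : t + (v :: vs).length = (t + 1) + vs.length := by simp; omega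
    rw [harr]
    simp only [pvRunIdx, pvLabelsIdx]
    rw [List.append_cons]
    exact this

lemma getD_set' (arr : List Int) (j' j : Nat) (val : Int) (hj : j < arr.length) :
    (arr.set j' val).getD j 0 = if j' = j ∧ j' < arr.length then val else arr.getD j 0 := by
  rw [List.getD_eq_getElem _ _ (by simpa using hj), List.getElem_set,
    List.getD_eq_getElem _ _ hj]
  by_cases hjj : j' = j
  · subst hjj
    by_cases hlt : j' < arr.length
    · simp [hlt]
    · omega
  · simp [hjj]

lemma scatter_inner (val : Int) (ms : List Int) : ∀ (arr : List Int),
    (∀ x ∈ ms, ∃ j' : Nat, j' < arr.length ∧ x = (j' : Int)) →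
    ((ms.foldl (fun a kk => PySem.List.pySetD a kk val) arr).length = arr.length ∧
     ∀ j : Nat, j < arr.length →
       (ms.foldl (fun a kk => PySem.List.pySetD a kk val) arr).getD j 0
         = if (j : Int) ∈ ms then val else arr.getD j 0) := by
  induction ms with
  | nil =>
    intro arr _
    simp
  | cons m ms ih =>
    intro arr hm
    obtain ⟨j', hj', hmj⟩ := hm m (by simp)
    subst hmj
    rw [List.foldl_cons, PySem.List.pySetD_natCast]
    have hlen : (arr.set j' val).length = arr.length := by simp
    have hmem' : ∀ x ∈ ms, ∃ j2 : Nat, j2 < (arr.set j' val).length ∧ x = (j2 : Int) := by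
      rw [hlen]
      exact fun x hx => hm x (by simp [hx])
    obtain ⟨ihlen, ihval⟩ := ih (arr.set j' val) hmem'
    refine ⟨by rw [ihlen, hlen], ?_⟩
    intro j hj
    rw [ihval j (by omega)]
    by_cases hin : (j : Int) ∈ ms
    · simp [hin]
    · rw [getD_set' arr j' j val hj]
      by_cases hjj : j' = j
      · subst hjj
        simp [hin, hj']
      · have hne : ((j : Int) ≠ (j' : Int)) := by
          intro hh
          exact hjj (by exact_mod_cast hh.symm)
        simp [hin, hne, if_neg (by omega : ¬ (j' = j ∧ j' < arr.length))]

lemma scatter_outer (S : List (Int × List Int)) (g : PySem.Dict String (List Int))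
    (pl : List Int) (n : Nat) (hInv : InvA S g) (hchar : pvChar n S pl) :
    ∀ L : Nat, L ≤ S.length →
    ((((List.range L).map (fun (k : Nat) => (k : Int))).foldl (fun pl' p => (g.getD (aKeyI (p + 1)) []).foldl
        (fun a kk => PySem.List.pySetD a kk (p + 1)) pl') (List.replicate n (0 : Int))).length = n ∧
     ∀ j : Nat, j < n →
       ((((List.range L).map (fun (k : Nat) => (k : Int))).foldl (fun pl' p => (g.getD (aKeyI (p + 1)) []).foldl
          (fun a kk => PySem.List.pySetD a kk (p + 1)) pl') (List.replicate n (0 : Int))).getD j 0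
         = if pl.getD j 0 ≤ (L : Int) then pl.getD j 0 else 0)) := by
  obtain ⟨hplen, hbnd, hbin⟩ := hchar
  intro L
  induction L with
  | zero =>
    intro _
    refine ⟨by simp, ?_⟩
    intro j hj
    rw [if_neg (by have := hbnd j hj; omega)]
    simp
  | succ L ih =>
    intro hL
    obtain ⟨ihlen, ihval⟩ := ih (by omega)
    rw [List.range_succ, List.map_append, List.foldl_append, List.map_singleton,
      List.foldl_cons, List.foldl_nil]
    set arr := (((List.range L).map (fun (k : Nat) => (k : Int))).foldl
        (fun pl' p => (g.getD (aKeyI (p + 1)) []).foldl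
          (fun a kk => PySem.List.pySetD a kk (p + 1)) pl') (List.replicate n (0 : Int))) with harr
    have hLlt : L < S.length := by omega
    have hgI : g.getD (aKeyI ((L : Int) + 1)) [] = S[L].2 := (hInv L hLlt).2
    rw [hgI]
    have hmem : ∀ x ∈ S[L].2, ∃ j' : Nat, j' < arr.length ∧ x = (j' : Int) := by
      intro x hx
      rw [hbin L hLlt] at hx
      obtain ⟨j2, hj2, rfl⟩ := List.mem_map.mp hx
      exact ⟨j2, by rw [ihlen]; exact List.mem_range.mp (List.mem_filter.mp hj2).1, rfl⟩
    obtain ⟨slen, sval⟩ := scatter_inner ((L : Int) + 1) S[L].2 arr hmem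
    refine ⟨by rw [slen, ihlen], ?_⟩
    intro j hj
    rw [sval j (by rw [ihlen]; exact hj), ihval j hj]
    have hmemiff : ((j : Int) ∈ S[L].2) ↔ pl.getD j 0 = (L : Int) + 1 := by
      rw [hbin L hLlt]
      constructor
      · intro hx
        obtain ⟨j2, hj2, hj2e⟩ := List.mem_map.mp hx
        have hji : j2 = j := by simpa using hj2e
        subst hji
        exact of_decide_eq_true (List.mem_filter.mp hj2).2
      · intro hx
        refine List.mem_map.mpr ⟨j, List.mem_filter.mpr ⟨List.mem_range.mpr hj, by simp only [decide_eq_true_eq]; exact hx⟩, rfl⟩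
    have hb := hbnd j hj
    by_cases hmemc : (j : Int) ∈ S[L].2
    · have heq := hmemiff.mp hmemc
      rw [if_pos hmemc, if_pos (by push_cast; omega)]
      omega
    · have hne : ¬ (pl.getD j 0 = (L : Int) + 1) := fun h => hmemc (hmemiff.mpr h)
      rw [if_neg hmemc]
      by_cases hle : pl.getD j 0 ≤ (L : Int)
      · rw [if_pos hle, if_pos (by push_cast; omega)]
      · rw [if_neg hle, if_neg (by push_cast; omega)]

lemma A_eq (mv : List Int) : create_bins mv = (mv, pvLabelsIdx mv 0 []) := by
  have hInv0 : InvA [] PySem.Dict.empty := by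
    intro k hk
    simp at hk
  obtain ⟨g', hfold, hInv'⟩ := A_run mv 0 [] PySem.Dict.empty hInv0 (fun _ => rfl)
  simp only [Nat.cast_zero, zero_add, List.length_nil] at hfold
  have hchar0 : pvChar 0 [] [] := by
    refine ⟨rfl, ?_, ?_⟩
    · intro j hj
      omega
    · intro k hk
      simp at hk
  have hchar := pvChar_run mv 0 [] [] hchar0
  simp only [zero_add, List.nil_append] at hchar
  obtain ⟨hplen, hbnd, hbin⟩ := hchar
  obtain ⟨slen, sval⟩ := scatter_outer (pvRunIdx mv 0 []) g' (pvLabelsIdx mv 0 [])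
    mv.length hInv' ⟨hplen, hbnd, hbin⟩ (pvRunIdx mv 0 []).length le_rfl
  unfold create_bins
  simp only [PySem.List.len_eq]
  rw [hfold]
  simp only
  rw [PySem.List.pyRange_zero_natCast]
  refine congrArg (Prod.mk mv) ?_
  refine List.ext_getElem (by rw [slen, hplen]) ?_
  intro j hj1 hj2
  have hjn : j < mv.length := by rw [slen] at hj1; exact hj1
  have hv := sval j hjn
  rw [List.getD_eq_getElem _ _ hj1, List.getD_eq_getElem _ _ hj2] at hv
  rw [hv]
  rw [if_pos ?_]
  have hb := hbnd j hjn
  rw [List.getD_eq_getElem _ _ hj2] at hb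
  exact hb.2

-- ===== VERDICT (by name: the statement is the Claim_ definition above) =====
theorem create_bins_spec : Claim_equal_create_bins := by
  intro mean_val _
  unfold Spec_create_bins
  rw [A_eq, B_eq]
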